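-- pv_equiv track=rewrite | github.com/R-Baptiste/Wandercraft-test- | Exercise_1/Exercise_1.py | distance_v2
-- ===== SOURCE A (Python) =====
-- def distance_v2(L1,L2):
--     res = 0
--     tmp = 0
--     for i in L1:
--         tmp = 0
--         for j in L2:
--             if i == j:
--                 tmp += 1
--         res += i * tmp
--     return res
-- ===== SOURCE B (Python) =====
-- def distance_v2(L1, L2):
--     c1 = {}
--     for v in L1:
--         c1[v] = c1.get(v, 0) + 1
--     c2 = {}
--     for v in L2:
--         c2[v] = c2.get(v, 0) + 1
--     return sum(v * n * c2.get(v, 0) for v, n in c1.items())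
-- ===== Notes on version B (the rewrite author's own statement) =====
-- stated objective: faster
-- what changed: Replaces A's nested per-element scan of L2 with two frequency dictionaries built in one pass each, summing v * c1[v] * c2[v] over the distinct values of L1.
import Mathlib
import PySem

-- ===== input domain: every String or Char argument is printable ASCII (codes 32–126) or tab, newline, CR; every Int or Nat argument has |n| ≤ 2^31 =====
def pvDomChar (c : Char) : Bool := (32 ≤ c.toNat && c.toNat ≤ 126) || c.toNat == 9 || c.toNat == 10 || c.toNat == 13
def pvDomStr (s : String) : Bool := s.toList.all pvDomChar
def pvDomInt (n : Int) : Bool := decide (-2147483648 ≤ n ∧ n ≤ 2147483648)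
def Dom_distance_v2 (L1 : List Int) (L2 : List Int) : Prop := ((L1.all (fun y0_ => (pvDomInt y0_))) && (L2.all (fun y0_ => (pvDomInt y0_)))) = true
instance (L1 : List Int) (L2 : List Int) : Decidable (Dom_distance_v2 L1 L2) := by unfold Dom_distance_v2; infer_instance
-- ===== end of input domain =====

-- B replaces A's O(n*m) nested scan with two one-pass frequency dictionaries and a single
-- pass over L1's distinct values (faster, asymptotic).


-- ===== PORT A =====
-- res, tmp accumulator pair; for each i the inner loop recounts i in L2
def distance_v2 (L1 : List Int) (L2 : List Int) : Int :=
  let st : Int × Int :=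
    L1.foldl (fun st i =>
      let tmp := L2.foldl (fun tmp j => if i == j then tmp + 1 else tmp) (0 : Int)
      (st.1 + i * tmp, tmp)) ((0 : Int), (0 : Int))
  st.1

-- ===== PORT B =====
def distance_v2_alt (L1 : List Int) (L2 : List Int) : Int :=
  let c1 : PySem.Dict Int Int := L1.foldl (fun d v => d.insert v (d.getD v 0 + 1)) PySem.Dict.empty
  let c2 : PySem.Dict Int Int := L2.foldl (fun d v => d.insert v (d.getD v 0 + 1)) PySem.Dict.empty
  (c1.items.map (fun p => p.1 * p.2 * c2.getD p.1 0)).sum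

-- ===== PRECONDITION & SPEC =====
def Spec_distance_v2 (L1 : List Int) (L2 : List Int) (out : Int) : Prop := out = distance_v2_alt L1 L2
instance (L1 : List Int) (L2 : List Int) (out : Int) : Decidable (Spec_distance_v2 L1 L2 out) := by unfold Spec_distance_v2; infer_instance

-- ===== CLAIM (what is proved, stated in full; the proofs are below) =====
def Claim_equal_distance_v2 : Prop := ∀ (L1 : List Int) (L2 : List Int), Dom_distance_v2 L1 L2 → Spec_distance_v2 L1 L2 (distance_v2 L1 L2)

-- ===== LEMMAS AND PROOFS =====

-- the inner loop counts i in L2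
theorem inner_count (i : Int) (L : List Int) (a : Int) :
    L.foldl (fun tmp j => if i == j then tmp + 1 else tmp) a = a + (L.count i : Int) := by
  induction L generalizing a with
  | nil => simp
  | cons y ys ih =>
    rw [List.foldl_cons]
    by_cases h : i = y
    · subst h
      rw [if_pos (by simp), ih, List.count_cons_self]
      push_cast; ring
    · rw [if_neg (by simp [h]), ih, List.count_cons_of_ne (Ne.symm h)]

-- A computes the per-element sum Σ_{i∈L1} i * count_{L2}(i)
theorem distance_v2_eq_sum (L1 L2 : List Int) :
    distance_v2 L1 L2 = (L1.map (fun i => i * (L2.count i : Int))).sum := by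
  have h : ∀ (L : List Int) (st : Int × Int),
      (L.foldl (fun st i =>
        let tmp := L2.foldl (fun tmp j => if i == j then tmp + 1 else tmp) (0 : Int)
        (st.1 + i * tmp, tmp)) st).1
      = st.1 + (L.map (fun i => i * (L2.count i : Int))).sum := by
    intro L
    induction L with
    | nil => intro st; simp
    | cons x xs ih =>
      intro st
      rw [List.foldl_cons, ih]
      simp only [List.map_cons, List.sum_cons, inner_count]
      ring
  have := h L1 ((0 : Int), (0 : Int))
  unfold distance_v2
  simpa using this

-- helper: summing an 'if k = x' singleton over a duplicate-free list containing x
theorem sum_map_ite_single (S : List Int) (x : Int) (c : Int)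
    (hnd : S.Nodup) (hx : x ∈ S) :
    (S.map (fun k => if k = x then c else 0)).sum = c := by
  induction S with
  | nil => cases hx
  | cons b S ih =>
    simp only [List.map_cons, List.sum_cons]
    rcases List.mem_cons.mp hx with h | h
    · have hz : ∀ k ∈ S, (if k = x then c else (0:Int)) = 0 := by
        intro k hk
        have hne : k ≠ x := fun e => (List.nodup_cons.mp hnd).1 (h ▸ e ▸ hk)
        simp [hne]
      rw [List.map_congr_left hz]
      simp [h.symm]
    · have hbx : b ≠ x := fun e => (List.nodup_cons.mp hnd).1 (e ▸ h)
      rw [ih (List.nodup_cons.mp hnd).2 h]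
      simp [hbx]

-- grouping: a sum over a list equals the count-weighted sum over its distinct values
theorem grouped (L : List Int) (f : Int → Int) :
    ((PySem.Set.ofList L).map (fun k => (L.count k : Int) * f k)).sum
      = (L.map f).sum := by
  induction L using List.reverseRecOn with
  | nil => simp [PySem.Set.ofList]
  | append_singleton L x ih =>
    rw [PySem.Set.ofList_append_singleton]
    by_cases hx : x ∈ L
    · rw [PySem.Set.add_of_mem (by simpa [PySem.Set.mem_ofList] using hx)]
      have hcong : ∀ k ∈ PySem.Set.ofList L,
          ((L ++ [x]).count k : Int) * f k
            = (L.count k : Int) * f k + (if k = x then f x else 0) := by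
        intro k _
        by_cases hkx : k = x
        · subst hkx; simp [List.count_append]; ring
        · have h1 : List.count k [x] = 0 := by simp [Ne.symm hkx]
          simp [List.count_append, h1, hkx]
      rw [List.map_congr_left hcong]
      rw [PySem.List.sum_map_add_int]
      rw [sum_map_ite_single _ x _ (PySem.Set.nodup_ofList L)
        (by simpa [PySem.Set.mem_ofList] using hx)]
      rw [ih]
      simp
    · rw [PySem.Set.add_of_not_mem (by simpa [PySem.Set.mem_ofList] using hx)]
      rw [List.map_append, List.sum_append]
      have hcong : ∀ k ∈ PySem.Set.ofList L,
          ((L ++ [x]).count k : Int) * f k = (L.count k : Int) * f k := by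
        intro k hk
        have hk' : k ∈ L := (PySem.Set.mem_ofList _ _).mp hk
        have hne : k ≠ x := fun e => hx (e ▸ hk')
        have h1 : List.count k [x] = 0 := by simp [Ne.symm hne]
        simp [List.count_append, h1]
      rw [List.map_congr_left hcong, ih]
      simp [List.count_append, List.count_eq_zero_of_not_mem hx]

theorem distance_v2_alt_eq_sum (L1 L2 : List Int) :
    distance_v2_alt L1 L2 = (L1.map (fun i => i * (L2.count i : Int))).sum := by
  unfold distance_v2_alt
  simp only [PySem.Dict.foldl_insert_getD_add_one_eq_counter, PySem.Dict.items_counter,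
    PySem.Dict.getD_counter, List.map_map]
  rw [← grouped L1 (fun i => i * (L2.count i : Int))]
  apply congrArg
  apply List.map_congr_left
  intro k _
  simp only [Function.comp]
  ring

-- ===== VERDICT (by name: the statement is the Claim_ definition above) =====
theorem distance_v2_spec : Claim_equal_distance_v2 := by
  intro L1 L2 _
  unfold Spec_distance_v2
  rw [distance_v2_eq_sum, distance_v2_alt_eq_sum]
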